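-- pv_equiv track=rewrite | github.com/achiwa912/daemonlord | dl.py | spell_counts
-- ===== SOURCE A (Python) =====
-- def spell_counts(start, diff, level):
--     """
--     Utility funciton to calculate spell counts.
--     """
--     clist = []
--     l = level - start
--     clist.append(l)
--     for _ in range(6):
--         l = l - diff
--         clist.append(min(max(l, 0), 9))
--     return clist
-- ===== SOURCE B (Python) =====
-- def spell_counts(start, diff, level):
--     base = level - start
--     return [base] + [min(max(base - diff * k, 0), 9) for k in range(1, 7)]
-- ===== Notes on version B (the rewrite author's own statement) =====
-- stated objective: simpler
-- what changed: Replaces the running accumulator l with a closed form per index: each clamped element is computed directly as min(max(level-start-diff*k,0),9) for k in 1..6, prepended with the unclamped head.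
import Mathlib
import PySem

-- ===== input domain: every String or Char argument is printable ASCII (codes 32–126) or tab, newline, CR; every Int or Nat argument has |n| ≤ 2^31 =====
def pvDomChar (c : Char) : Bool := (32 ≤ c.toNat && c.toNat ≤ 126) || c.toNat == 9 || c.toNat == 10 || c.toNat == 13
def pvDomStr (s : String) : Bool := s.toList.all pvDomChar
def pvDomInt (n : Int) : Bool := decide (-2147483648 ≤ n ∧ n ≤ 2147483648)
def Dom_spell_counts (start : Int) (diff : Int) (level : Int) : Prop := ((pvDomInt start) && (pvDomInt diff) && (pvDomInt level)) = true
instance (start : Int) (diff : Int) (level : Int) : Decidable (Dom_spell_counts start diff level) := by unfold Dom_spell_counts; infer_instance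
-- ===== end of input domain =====

-- B replaces A's running accumulator with a per-index closed form min(max(level-start-diff*k,0),9); objective: simpler.


-- ===== PORT A =====
def spell_counts (start : Int) (diff : Int) (level : Int) : List Int :=
  let l : Int := level - start
  let clist : List Int := [l]
  let res := (List.range 6).foldl (fun (st : Int × List Int) _ =>
    let l' := st.1 - diff
    (l', st.2 ++ [min (max l' 0) 9])) (l, clist)
  res.2

-- ===== PORT B =====
-- B: closed form per index, no running accumulator
def spell_counts_alt (start : Int) (diff : Int) (level : Int) : List Int :=
  let base := level - start
  [base] ++ (PySem.List.pyRange 1 7 1).map (fun k => min (max (base - diff * k) 0) 9)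

-- ===== PRECONDITION & SPEC =====
def Spec_spell_counts (start : Int) (diff : Int) (level : Int) (out : List Int) : Prop := out = spell_counts_alt start diff level
instance (start : Int) (diff : Int) (level : Int) (out : List Int) : Decidable (Spec_spell_counts start diff level out) := by unfold Spec_spell_counts; infer_instance

-- ===== CLAIM (what is proved, stated in full; the proofs are below) =====
def Claim_equal_spell_counts : Prop := ∀ (start : Int) (diff : Int) (level : Int), Dom_spell_counts start diff level → Spec_spell_counts start diff level (spell_counts start diff level)

-- ===== LEMMAS AND PROOFS =====

-- ===== VERDICT (by name: the statement is the Claim_ definition above) =====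
theorem spell_counts_spec : Claim_equal_spell_counts := by
  intro start diff level _
  unfold Spec_spell_counts spell_counts spell_counts_alt
  simp [List.range_succ, PySem.List.pyRange]
  ring_nf
  simp
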